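-- pv_equiv track=rewrite | github.com/ItsAlessandro/Royal-Chess | client/models/engine/engine.py | mask_rook_attacks
-- ===== SOURCE A (Python) =====
-- def mask_rook_attacks(square: int) -> int:
--     # result attacks bitboard
--     attacks = 0
--
--     # init target rank & files
--     tr = square // 8
--     tf = square % 8
--
--     # mask relevant rook occupancy bits
--     for r in range(tr + 1, 7): attacks |= (1 << (r * 8 + tf))
--     for r in range(tr - 1, 0, -1): attacks |= (1 << (r * 8 + tf))
--     for f in range(tf + 1, 7): attacks |= (1 << (tr * 8 + f))
--     for f in range(tf - 1, 0, -1): attacks |= (1 << (tr * 8 + f))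
--
--     # return attack map
--     return attacks
-- ===== SOURCE B (Python) =====
-- def mask_rook_attacks(square: int) -> int:
--     # closed-form bit-constant construction: no directional loops
--     tr, tf = divmod(square, 8)
--
--     # rep(k) = a column of k one-bits spaced 8 apart (bits 0, 8, ..., 8*(k-1))
--     def rep(k: int) -> int:
--         return ((1 << (8 * k)) - 1) // 255 if k > 0 else 0
--
--     # vertical mask on file tf: ranks 1..tr-1 below, ranks tr+1..6 above
--     vert = rep(tr - 1) << 8
--     if tr < 6:
--         vert |= rep(6 - tr) << (8 * (tr + 1))
--
--     # horizontal mask on rank tr: files 1..6 except tf itself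
--     horiz = (0x7E & ~(1 << tf)) << (8 * tr)
--
--     return (vert << tf) | horiz
-- ===== Notes on version B (the rewrite author's own statement) =====
-- stated objective: faster
-- what changed: Replaces A's four directional bit-setting loops by a closed-form construction: a repeated-byte column constant shifted to the target file gives the vertical bits and a rank constant with the origin bit removed shifted to the target rank gives the horizontal bits, OR-ed together.
import Mathlib
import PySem

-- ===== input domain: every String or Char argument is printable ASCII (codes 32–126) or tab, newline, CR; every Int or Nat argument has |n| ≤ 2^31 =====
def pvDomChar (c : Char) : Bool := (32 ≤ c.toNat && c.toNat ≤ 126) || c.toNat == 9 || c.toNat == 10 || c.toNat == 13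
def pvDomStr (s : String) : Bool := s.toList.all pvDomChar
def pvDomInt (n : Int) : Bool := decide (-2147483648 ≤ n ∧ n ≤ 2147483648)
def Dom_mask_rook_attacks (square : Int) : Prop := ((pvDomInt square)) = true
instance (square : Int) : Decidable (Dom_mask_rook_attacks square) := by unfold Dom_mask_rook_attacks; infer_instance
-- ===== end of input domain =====

-- B replaces A's four directional bit-setting loops by closed-form bit-constant arithmetic (measured faster).

-- ===== PORT A =====
-- Python's '1 << e' is ported as '(1 : Int) <<< e.toNat': under Pre_ every exponent A
-- shifts by is nonnegative, so '.toNat' is exact there (Python raises on negative squares).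
def mask_rook_attacks (square : Int) : Int :=
  let attacks : Int := 0
  let tr := PySem.Int.floordiv square 8
  let tf := PySem.Int.mod square 8
  let attacks := (PySem.List.pyRange (tr + 1) 7 1).foldl
    (fun a r => PySem.Int.bor a ((1 : Int) <<< (r * 8 + tf).toNat)) attacks
  let attacks := (PySem.List.pyRange (tr - 1) 0 (-1)).foldl
    (fun a r => PySem.Int.bor a ((1 : Int) <<< (r * 8 + tf).toNat)) attacks
  let attacks := (PySem.List.pyRange (tf + 1) 7 1).foldl
    (fun a f => PySem.Int.bor a ((1 : Int) <<< (tr * 8 + f).toNat)) attacks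
  let attacks := (PySem.List.pyRange (tf - 1) 0 (-1)).foldl
    (fun a f => PySem.Int.bor a ((1 : Int) <<< (tr * 8 + f).toNat)) attacks
  attacks

-- ===== PORT B =====
-- rep(k) = ((1 << 8k) - 1) // 255 if k > 0 else 0  (column of k one-bits spaced 8 apart)
def pvRep (k : Int) : Int :=
  if k > 0 then PySem.Int.floordiv ((1 : Int) <<< (8 * k).toNat - 1) 255 else 0

def mask_rook_attacks_alt (square : Int) : Int :=
  let tr := PySem.Int.floordiv square 8
  let tf := PySem.Int.mod square 8
  let vert := pvRep (tr - 1) <<< (8 : Nat)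
  let vert := if tr < 6 then PySem.Int.bor vert (pvRep (6 - tr) <<< (8 * (tr + 1)).toNat) else vert
  let horiz := (PySem.Int.band 0x7E (Int.not ((1 : Int) <<< tf.toNat))) <<< (8 * tr).toNat
  PySem.Int.bor (vert <<< tf.toNat) horiz

-- ===== PRECONDITION & SPEC =====
-- Pre_: exactly the inputs on which the Python A returns; on negative squares A raises
-- ValueError (negative shift count in its file/rank loops).
def Pre_mask_rook_attacks (square : Int) : Prop := 0 ≤ square
instance (square : Int) : Decidable (Pre_mask_rook_attacks square) := by
  unfold Pre_mask_rook_attacks; infer_instance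
def pvWitness_mask_rook_attacks : Int := 27

def Spec_mask_rook_attacks (square : Int) (out : Int) : Prop := out = mask_rook_attacks_alt square
instance (square : Int) (out : Int) : Decidable (Spec_mask_rook_attacks square out) := by
  unfold Spec_mask_rook_attacks; infer_instance

-- ===== CLAIM (what is proved, stated in full; the proofs are below) =====
def Claim_equal_mask_rook_attacks : Prop := ∀ (square : Int), Dom_mask_rook_attacks square → Pre_mask_rook_attacks square → Spec_mask_rook_attacks square (mask_rook_attacks square)

-- ===== LEMMAS AND PROOFS =====

-- colN k : Nat value of the column constant rep(k) = bits 0, 8, …, 8*(k-1)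
def colN : Nat → Nat
  | 0 => 0
  | k + 1 => 2 ^ (8 * k) + colN k

lemma colN_lt (k : Nat) : colN k < 2 ^ (8 * k) := by
  induction k with
  | zero => simp [colN]
  | succ k ih =>
    have h : (2:Nat) ^ (8 * k) * 2 ≤ 2 ^ (8 * (k + 1)) := by
      rw [show 8 * (k+1) = 8*k + 8 by ring, pow_add]
      exact Nat.mul_le_mul_left _ (by norm_num)
    simp only [colN]; omega

lemma colN_mul_255 (k : Nat) : 255 * colN k = 2 ^ (8 * k) - 1 := by
  induction k with
  | zero => simp [colN]
  | succ k ih =>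
    have h1 : (1:Nat) ≤ 2 ^ (8 * k) := Nat.one_le_two_pow
    have h : (2:Nat) ^ (8 * (k + 1)) = 2 ^ (8 * k) * 256 := by
      rw [show 8 * (k+1) = 8*k + 8 by ring, pow_add]; norm_num
    simp only [colN]; rw [h]; omega

-- rep(↑k) computes colN k
lemma pvRep_natCast (k : Nat) : pvRep (k : Int) = (colN k : Int) := by
  unfold pvRep
  rcases Nat.eq_zero_or_pos k with h | h
  · subst h; simp [colN]
  · have hk : (0:Int) < (k:Int) := by exact_mod_cast h
    rw [if_pos hk]
    have h8 : ((8 * (k:Int)).toNat) = 8 * k := by omega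
    have hpow : ((1:Int) <<< (8 * k) - 1) = ((2 ^ (8*k) - 1 : Nat) : Int) := by
      rw [Int.shiftLeft_eq, one_mul]
      have : (1:Nat) ≤ 2 ^ (8*k) := Nat.one_le_two_pow
      push_cast [this]; ring
    rw [h8, hpow, ← colN_mul_255 k]
    rw [show ((255 * colN k : Nat) : Int) = ((255 * colN k : Nat) : Int) from rfl]
    push_cast
    rw [show (255 : Int) * (colN k : Int) = (colN k : Int) * 255 by ring]
    rw [PySem.Int.floordiv_eq_ediv_of_pos (by norm_num)]
    exact Int.mul_ediv_cancel _ (by norm_num)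

-- pull the accumulator out of an or-fold (Nat-valued)
lemma foldl_lor_init (h : Int → Nat) (l : List Int) (acc : Nat) :
    l.foldl (fun a r => a ||| h r) acc = acc ||| l.foldl (fun a r => a ||| h r) 0 := by
  induction l generalizing acc with
  | nil => simp
  | cons x xs ih =>
    simp only [List.foldl_cons]
    rw [ih (acc ||| h x), ih (0 ||| h x), Nat.zero_or, Nat.lor_assoc]

-- an Int or-fold of nonnegative bit terms is the cast of the Nat or-fold
lemma foldl_bor_natCast (h : Int → Nat) (l : List Int) (acc : Nat) :
    l.foldl (fun a r => PySem.Int.bor a ((h r : Nat) : Int)) ((acc : Nat) : Int)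
      = ((l.foldl (fun a r => a ||| h r) acc : Nat) : Int) := by
  induction l generalizing acc with
  | nil => simp
  | cons x xs ih =>
    simp only [List.foldl_cons, PySem.Int.bor_natCast]
    exact ih (acc ||| h x)

-- the descending column loop: OR of bits (r*8 + t) for r = q, q-1, …, 1
lemma col_loop (q t : Nat) :
    (PySem.List.pyRange (q : Int) 0 (-1)).foldl
      (fun a r => a ||| 2 ^ ((r * 8 + (t : Int)).toNat)) 0 = colN q <<< (8 + t) := by
  induction q with
  | zero => simp [PySem.List.pyRange_neg_one_eq_nil, colN]
  | succ q ih =>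
    rw [show ((q + 1 : Nat) : Int) = ((q : Int) + 1) by push_cast; ring]
    rw [PySem.List.pyRange_neg_one_cons (by positivity)]
    simp only [List.foldl_cons, Nat.zero_or]
    rw [show ((q:Int) + 1 - 1) = (q : Int) by ring]
    rw [foldl_lor_init, ih]
    have he : ((((q:Int) + 1) * 8 + (t : Int)).toNat) = 8 * q + (8 + t) := by omega
    rw [he]
    have h1 : (2:Nat) ^ (8 * q + (8 + t)) = (2 ^ (8 * q)) <<< (8 + t) := by
      rw [Nat.shiftLeft_eq, pow_add]
    rw [h1, ← Nat.shiftLeft_or_distrib]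
    have h2 : (2:Nat) ^ (8 * q) ||| colN q = 2 ^ (8 * q) + colN q := by
      have := Nat.shiftLeft_add_eq_or_of_lt (i := 8 * q) (b := colN q) (colN_lt q) 1
      simpa [Nat.shiftLeft_eq] using this.symm
    rw [h2]; rfl


-- (1 : Int) <<< k is the cast of the Nat power 2^k
lemma one_shiftLeft_natCast (k : Nat) : (1 : Int) <<< k = ((2 ^ k : Nat) : Int) := by
  rw [Int.shiftLeft_eq, one_mul]; push_cast; ring

lemma natCast_shiftLeft (m k : Nat) : ((m : Nat) : Int) <<< k = ((m <<< k : Nat) : Int) := by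
  rw [Int.shiftLeft_eq, Nat.shiftLeft_eq]; push_cast; ring

-- an Int bit-or fold of 1-shifts is the cast of the corresponding Nat fold
lemma int_fold_to_nat_zero (l : List Int) (g : Int → Nat) :
    l.foldl (fun a r => PySem.Int.bor a ((1 : Int) <<< g r)) 0
      = ((l.foldl (fun a r => a ||| 2 ^ g r) 0 : Nat) : Int) := by
  simp only [one_shiftLeft_natCast]
  exact_mod_cast foldl_bor_natCast (fun r => 2 ^ g r) l 0

lemma int_fold_to_nat (l : List Int) (g : Int → Nat) (acc : Nat) :
    l.foldl (fun a r => PySem.Int.bor a ((1 : Int) <<< g r)) ((acc : Nat) : Int)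
      = ((l.foldl (fun a r => a ||| 2 ^ g r) acc : Nat) : Int) := by
  simp only [one_shiftLeft_natCast]
  exact foldl_bor_natCast (fun r => 2 ^ g r) l acc

-- pull a common 2^(8q) factor out of a row fold whose offsets are nonnegative
lemma fold_shift (q : Nat) (l : List Int) (h : ∀ f ∈ l, 0 ≤ f) :
    l.foldl (fun a f => a ||| 2 ^ (((q : Int) * 8 + f).toNat)) 0
      = (l.foldl (fun a f => a ||| 2 ^ f.toNat) 0) <<< (8 * q) := by
  induction l with
  | nil => simp
  | cons x xs ih =>
    have hx : (0 : Int) ≤ x := h x (List.mem_cons_self ..)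
    simp only [List.foldl_cons, Nat.zero_or]
    rw [foldl_lor_init, foldl_lor_init (fun f => 2 ^ f.toNat),
      ih (fun f hf => h f (List.mem_cons_of_mem _ hf))]
    have he : (((q : Int) * 8 + x).toNat) = x.toNat + 8 * q := by omega
    rw [he, pow_add, ← Nat.shiftLeft_eq (2 ^ x.toNat) (8 * q), ← Nat.shiftLeft_or_distrib]

-- the horizontal row constant 0x7E & ~(1 << t), as a Nat
def rowCN (t : Nat) : Nat := 126 &&& (255 ^^^ (1 <<< t))

lemma row_const (t : Nat) (ht : t < 8) :
    PySem.Int.band 0x7E (Int.not ((1 : Int) <<< t)) = ((rowCN t : Nat) : Int) := by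
  interval_cases t <;> decide

-- both row loops of A combined equal the shifted row constant
lemma row_loops (q t : Nat) (ht : t < 8) :
    ((PySem.List.pyRange ((t : Int) + 1) 7 1).foldl
        (fun a f => a ||| 2 ^ (((q : Int) * 8 + f).toNat)) 0) |||
      ((PySem.List.pyRange ((t : Int) - 1) 0 (-1)).foldl
        (fun a f => a ||| 2 ^ (((q : Int) * 8 + f).toNat)) 0)
      = rowCN t <<< (8 * q) := by
  rw [fold_shift q _ (fun f hf => by
      rw [PySem.List.mem_pyRange_one] at hf; omega),
    fold_shift q _ (fun f hf => by
      rw [PySem.List.mem_pyRange_neg_one] at hf; omega),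
    ← Nat.shiftLeft_or_distrib]
  congr 1
  interval_cases t <;> decide

-- ===== VERDICT (by name: the statement is the Claim_ definition above) =====
theorem mask_rook_attacks_spec : Claim_equal_mask_rook_attacks := by
  intro square _ hpre
  unfold Pre_mask_rook_attacks at hpre
  unfold Spec_mask_rook_attacks
  lift square to ℕ using hpre with n
  by_cases hn : n < 48
  · interval_cases n <;> decide
  · have hq : 6 ≤ n / 8 := by omega
    have ht : n % 8 < 8 := Nat.mod_lt _ (by norm_num)
    have hdiv : PySem.Int.floordiv (n : Int) 8 = ((n / 8 : Nat) : Int) := by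
      exact_mod_cast PySem.Int.floordiv_natCast n 8
    have hmod : PySem.Int.mod (n : Int) 8 = ((n % 8 : Nat) : Int) := by
      exact_mod_cast PySem.Int.mod_natCast n 8
    set q := n / 8 with hqdef
    set t := n % 8 with htdef
    simp only [mask_rook_attacks, mask_rook_attacks_alt, hdiv, hmod]
    -- A side: first loop is empty (tr ≥ 6)
    rw [PySem.List.pyRange_one_eq_nil (by exact_mod_cast (by omega : (7:Int) ≤ (q:Int) + 1))]
    rw [List.foldl_nil]
    rw [show ((q : Int) - 1) = ((q - 1 : Nat) : Int) by omega]
    rw [int_fold_to_nat_zero, int_fold_to_nat, int_fold_to_nat]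
    -- B side
    rw [if_neg (by exact_mod_cast (by omega : ¬ ((q:Int) < 6)))]
    simp only [Int.toNat_natCast]
    rw [pvRep_natCast, natCast_shiftLeft, natCast_shiftLeft]
    rw [row_const t ht, show ((8 * (q:Int)).toNat) = 8 * q by omega, natCast_shiftLeft,
      PySem.Int.bor_natCast]
    congr 1
    -- Nat level
    rw [foldl_lor_init _ _ (List.foldl _ 0 _)]
    rw [foldl_lor_init]
    rw [Nat.lor_assoc, col_loop (q - 1) t, row_loops q t ht, Nat.shiftLeft_add]
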